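-- pv_equiv track=rewrite | github.com/image-science-laboratory/cordility-sugimizu | lesson4/4-2.py | solution
-- ===== SOURCE A (Python) =====
-- def solution(A):
--     # # O(n**2)
--     # for i in range(1, len(A) + 1):
--     #     if i not in A:
--     #         return 0
--
--     dic = {}
--
--     for i in A:
--         dic[i] = True
--
--     for i in range(1, len(A) + 1):
--         if i not in dic:
--             return 0
--
--     return 1
-- ===== SOURCE B (Python) =====
-- def solution(A):
--     return 1 if sorted(A) == list(range(1, len(A) + 1)) else 0
-- ===== Notes on version B (the rewrite author's own statement) =====
-- stated objective: idiomatic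
-- what changed: Replaces the dict-build plus probe loop over 1..n by a single sorted(A) == list(range(1, len(A)+1)) comparison (correct by pigeonhole since the lengths match).
import Mathlib
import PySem

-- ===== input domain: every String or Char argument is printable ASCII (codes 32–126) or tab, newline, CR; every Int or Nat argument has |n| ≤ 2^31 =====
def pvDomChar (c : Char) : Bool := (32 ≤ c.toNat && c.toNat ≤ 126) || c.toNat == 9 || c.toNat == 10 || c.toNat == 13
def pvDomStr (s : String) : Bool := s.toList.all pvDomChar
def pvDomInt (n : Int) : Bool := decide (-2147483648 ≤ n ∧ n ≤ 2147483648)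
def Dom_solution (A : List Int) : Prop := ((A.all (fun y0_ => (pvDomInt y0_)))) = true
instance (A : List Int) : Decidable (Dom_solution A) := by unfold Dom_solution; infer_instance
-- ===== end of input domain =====

-- B replaces A's dict-build plus probe loop by a sorted(A) == list(range(1,len(A)+1)) comparison (idiomatic; not faster).

-- ===== PORT A =====
-- second loop of A: probe each i of range(1, len(A)+1); early-return 0 on a miss, 1 at the end
def solutionProbe (dic : PySem.Dict Int Bool) : List Int → Int
  | [] => 1
  | i :: rest => if dic.contains i then solutionProbe dic rest else 0

def solution (A : List Int) : Int :=
  let dic := A.foldl (fun d i => d.insert i true) PySem.Dict.empty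
  solutionProbe dic (PySem.List.pyRange 1 ((A.length : Int) + 1) 1)

-- ===== PORT B =====
def solution_alt (A : List Int) : Int :=
  if PySem.List.sorted A (fun x => x) false = PySem.List.pyRange 1 ((A.length : Int) + 1) 1 then 1 else 0

-- ===== PRECONDITION & SPEC =====
def Spec_solution (A : List Int) (out : Int) : Prop := out = solution_alt A
instance (A : List Int) (out : Int) : Decidable (Spec_solution A out) := by unfold Spec_solution; infer_instance

-- ===== CLAIM (what is proved, stated in full; the proofs are below) =====
def Claim_equal_solution : Prop := ∀ (A : List Int), Dom_solution A → Spec_solution A (solution A)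

-- ===== LEMMAS AND PROOFS =====

lemma contains_foldl_insert (A : List Int) (d0 : PySem.Dict Int Bool) (x : Int) :
    (A.foldl (fun d i => d.insert i true) d0).contains x = true ↔ x ∈ A ∨ d0.contains x = true := by
  induction A generalizing d0 with
  | nil => simp
  | cons a t ih =>
    simp [List.foldl_cons, ih, PySem.Dict.contains_insert]
    constructor
    · rintro (h | h | h) <;> simp_all
    · rintro ((h | h) | h) <;> simp_all

lemma solutionProbe_eq (dic : PySem.Dict Int Bool) (l : List Int) :
    solutionProbe dic l = if ∀ i ∈ l, dic.contains i = true then 1 else 0 := by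
  induction l with
  | nil => simp [solutionProbe]
  | cons i rest ih =>
    simp only [solutionProbe, ih]
    by_cases h : dic.contains i = true <;> simp [h]

lemma perm_of_range_subset (A : List Int)
    (h : ∀ i ∈ PySem.List.pyRange 1 ((A.length : Int) + 1) 1, i ∈ A) :
    (PySem.List.pyRange 1 ((A.length : Int) + 1) 1).Perm A := by
  have hnd := PySem.List.nodup_pyRange_one (a := 1) (b := (A.length : Int) + 1)
  have hsub : PySem.List.pyRange 1 ((A.length : Int) + 1) 1 ⊆ A := fun i hi => h i hi
  have hsp := List.subperm_of_subset hnd hsub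
  have hlen : A.length ≤ (PySem.List.pyRange 1 ((A.length : Int) + 1) 1).length := by
    rw [PySem.List.length_pyRange_one]; omega
  exact hsp.perm_of_length_le hlen

-- ===== VERDICT (by name: the statement is the Claim_ definition above) =====
theorem solution_spec : Claim_equal_solution := by
  intro A _
  show solution A = solution_alt A
  unfold solution solution_alt
  rw [solutionProbe_eq]
  by_cases h : ∀ i ∈ PySem.List.pyRange 1 ((A.length : Int) + 1) 1, i ∈ A
  · have hperm := perm_of_range_subset A h
    have hsorted := PySem.List.sorted_eq_of_perm_of_pairwise_lt A
      (PySem.List.pyRange 1 ((A.length : Int) + 1) 1) (fun x => x) hperm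
      (PySem.List.pairwise_lt_pyRange_one 1 _)
    have hcontains : ∀ i ∈ PySem.List.pyRange 1 ((A.length : Int) + 1) 1,
        (A.foldl (fun d i => d.insert i true) PySem.Dict.empty).contains i = true := by
      intro i hi; rw [contains_foldl_insert]; exact Or.inl (h i hi)
    rw [if_pos hcontains, if_pos hsorted]
  · rw [if_neg, if_neg]
    · intro hsorted
      apply h
      intro i hi
      have hperm : (PySem.List.sorted A (fun x => x) false).Perm A := PySem.List.sorted_perm A _ _
      rw [hsorted] at hperm
      exact hperm.mem_iff.mp hi
    · intro hall
      apply h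
      intro i hi
      have := hall i hi
      rw [contains_foldl_insert] at this
      rcases this with h1 | h1
      · exact h1
      · simp [PySem.Dict.empty] at h1
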